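-- pv_equiv track=rewrite | github.com/JacopoSfolgor1/Jacopo-Sfolgori-Python | Testing/inputinfamecalcoloseta+setb.py | calculate_happiness
-- ===== SOURCE A (Python) =====
-- def calculate_happiness(arr, set_A, set_B):
--
--     happiness = 0
--
--     for num in arr:
--         if num in set_A:
--             happiness += 1
--         elif num in set_B:
--             happiness -= 1
--
--     return happiness
-- ===== SOURCE B (Python) =====
-- def calculate_happiness(arr, set_A, set_B):
--     cnt = {}
--     for num in arr:
--         cnt[num] = cnt.get(num, 0) + 1
--     sA = set(set_A)
--     sB = set(set_B)
--     plus = sum(c for v, c in cnt.items() if v in sA)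
--     minus = sum(c for v, c in cnt.items() if v in sB and v not in sA)
--     return plus - minus
-- ===== Notes on version B (the rewrite author's own statement) =====
-- stated objective: alternative
-- what changed: B builds a frequency dictionary of arr once and converts set_A/set_B to sets, then computes the score as a sum over distinct values weighted by multiplicity, instead of A's per-element scan with list membership tests.
import Mathlib
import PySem

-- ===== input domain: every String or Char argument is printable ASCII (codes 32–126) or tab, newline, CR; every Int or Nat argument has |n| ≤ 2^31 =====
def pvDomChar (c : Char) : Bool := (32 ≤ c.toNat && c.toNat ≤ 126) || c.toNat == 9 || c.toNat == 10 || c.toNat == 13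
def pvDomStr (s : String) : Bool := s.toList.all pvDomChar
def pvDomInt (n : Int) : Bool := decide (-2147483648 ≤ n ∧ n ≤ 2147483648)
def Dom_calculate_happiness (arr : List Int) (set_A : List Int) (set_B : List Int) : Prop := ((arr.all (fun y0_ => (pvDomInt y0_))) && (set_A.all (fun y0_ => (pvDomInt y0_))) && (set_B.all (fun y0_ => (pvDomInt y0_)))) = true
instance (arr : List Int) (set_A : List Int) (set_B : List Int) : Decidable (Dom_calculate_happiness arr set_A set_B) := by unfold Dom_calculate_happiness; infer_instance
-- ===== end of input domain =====

-- B replaces A's per-element scan (list membership per element) by a frequency dict over arr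
-- plus set-converted set_A/set_B, summing multiplicities over distinct values (objective: alternative).
-- ===== PORT A =====
def calculate_happiness (arr : List Int) (set_A : List Int) (set_B : List Int) : Int :=
  arr.foldl (fun happiness num =>
    if set_A.contains num then happiness + 1
    else if set_B.contains num then happiness - 1
    else happiness) 0

-- ===== PORT B =====
def calculate_happiness_alt (arr : List Int) (set_A : List Int) (set_B : List Int) : Int :=
  let cnt : PySem.Dict Int Int :=
    arr.foldl (fun d num => d.insert num (d.getD num 0 + 1)) PySem.Dict.empty
  let sA : PySem.Set Int := PySem.Set.ofList set_A
  let sB : PySem.Set Int := PySem.Set.ofList set_B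
  let plus := ((cnt.items.filter (fun p => sA.contains p.1)).map (fun p => p.2)).sum
  let minus := ((cnt.items.filter (fun p => sB.contains p.1 && !(sA.contains p.1))).map (fun p => p.2)).sum
  plus - minus

-- ===== PRECONDITION & SPEC =====
def Spec_calculate_happiness (arr : List Int) (set_A : List Int) (set_B : List Int) (out : Int) : Prop := out = calculate_happiness_alt arr set_A set_B
instance (arr : List Int) (set_A : List Int) (set_B : List Int) (out : Int) : Decidable (Spec_calculate_happiness arr set_A set_B out) := by unfold Spec_calculate_happiness; infer_instance

-- ===== CLAIM (what is proved, stated in full; the proofs are below) =====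
def Claim_equal_calculate_happiness : Prop := ∀ (arr : List Int) (set_A : List Int) (set_B : List Int), Dom_calculate_happiness arr set_A set_B → Spec_calculate_happiness arr set_A set_B (calculate_happiness arr set_A set_B)

-- ===== LEMMAS AND PROOFS =====

-- per-element score, the common value both programs sum
def pvScore (set_A set_B : List Int) (num : Int) : Int :=
  if set_A.contains num then 1 else if set_B.contains num then -1 else 0

theorem a_eq_sum (arr set_A set_B : List Int) :
    calculate_happiness arr set_A set_B = (arr.map (pvScore set_A set_B)).sum := by
  unfold calculate_happiness
  have h : (fun (happiness : Int) (num : Int) =>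
      if set_A.contains num then happiness + 1
      else if set_B.contains num then happiness - 1
      else happiness)
      = fun happiness num => happiness + pvScore set_A set_B num := by
    funext h n; unfold pvScore; split_ifs <;> ring
  rw [h]
  simp [PySem.List.foldl_add]

theorem sum_count_mul (xs s : List Int) (hn : s.Nodup) (hm : ∀ v, v ∈ s ↔ v ∈ xs)
    (f : Int → Int) :
    (s.map (fun k => (xs.count k : Int) * f k)).sum = (xs.map f).sum := by
  have hfs : s.toFinset = xs.toFinset := by
    ext v; simp [hm v]
  rw [Finset.sum_list_map_count xs f, ← hfs,
    ← List.sum_toFinset (fun k => (xs.count k : Int) * f k) hn]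
  refine Finset.sum_congr rfl (fun m _ => ?_)
  simp

theorem comb_sum (S : List Int) (c : Int → Int) (pA pB : Int → Bool) :
    ((S.filter (fun k => pA k)).map c).sum
      - ((S.filter (fun k => pB k && !pA k)).map c).sum
    = (S.map (fun k => c k * (if pA k then 1 else if pB k then -1 else 0))).sum := by
  induction S with
  | nil => simp
  | cons x t ih =>
    by_cases hA : pA x <;> by_cases hB : pB x <;>
      simp [hA, hB] at ih ⊢ <;> omega

theorem set_contains_ofList (xs : List Int) (v : Int) :
    (PySem.Set.ofList xs).contains v = xs.contains v := by
  by_cases h : v ∈ xs <;>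
    simp [PySem.Set.mem_ofList, h]

theorem b_eq_sum (arr set_A set_B : List Int) :
    calculate_happiness_alt arr set_A set_B = (arr.map (pvScore set_A set_B)).sum := by
  unfold calculate_happiness_alt
  simp only [PySem.Dict.foldl_insert_getD_add_one_eq_counter, PySem.Dict.items_counter,
    List.filter_map, List.map_map, Function.comp_def, set_contains_ofList]
  rw [comb_sum (PySem.Set.ofList arr) (fun k => (arr.count k : Int))
      (fun k => set_A.contains k) (fun k => set_B.contains k)]
  simpa [pvScore] using
    sum_count_mul arr (PySem.Set.ofList arr) (PySem.Set.nodup_ofList arr)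
      (fun v => PySem.Set.mem_ofList arr v) (pvScore set_A set_B)

-- ===== VERDICT =====
theorem calculate_happiness_spec : Claim_equal_calculate_happiness := by
  intro arr set_A set_B _
  unfold Spec_calculate_happiness
  rw [a_eq_sum, b_eq_sum]
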